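-- pv_equiv track=rewrite | github.com/zvonicek/IT3708 | task2_evolution/evolutionary/ea_impl/suprising_sequences.py | is_surprising
-- ===== SOURCE A (Python) =====
-- def is_surprising(seq, d):
--     subseq = set()
--     collisions = 0
--
--     for i in range(0, len(seq)-d-1):
--         word = (seq[i], seq[i+d+1])
--         if word in subseq:
--             collisions += 1
--         else:
--             subseq.add(word)
--
--     return collisions
-- ===== SOURCE B (Python) =====
-- def is_surprising(seq, d):
--     pairs = sorted((seq[i], seq[i + d + 1]) for i in range(0, len(seq) - d - 1))
--     return sum(x == y for x, y in zip(pairs, pairs[1:]))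
-- ===== Notes on version B (the rewrite author's own statement) =====
-- stated objective: alternative
-- what changed: Replaces A's streaming seen-set with per-pair collision branch by a sort-then-scan: build the distance-(d+1) pair list, sort it, and count adjacent equal neighbours.
import Mathlib
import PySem

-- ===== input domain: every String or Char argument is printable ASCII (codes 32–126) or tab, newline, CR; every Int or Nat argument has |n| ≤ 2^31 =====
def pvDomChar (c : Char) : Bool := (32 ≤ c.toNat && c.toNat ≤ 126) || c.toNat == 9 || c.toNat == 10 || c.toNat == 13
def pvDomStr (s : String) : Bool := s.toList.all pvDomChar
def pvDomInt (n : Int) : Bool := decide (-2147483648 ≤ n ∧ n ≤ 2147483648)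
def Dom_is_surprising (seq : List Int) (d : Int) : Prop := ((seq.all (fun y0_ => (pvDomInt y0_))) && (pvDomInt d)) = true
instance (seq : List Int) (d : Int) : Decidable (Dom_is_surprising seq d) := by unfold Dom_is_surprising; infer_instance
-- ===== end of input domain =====

-- B replaces A's streaming seen-set/collision branch by sort-then-scan: build the
-- distance-(d+1) pair list, sort it, count adjacent equal neighbours (alternative decomposition).


-- ===== PORT A =====
def is_surprising (seq : List Int) (d : Int) : Int :=
  let st :=
    (PySem.List.pyRange 0 ((seq.length : Int) - d - 1) 1).foldl
      (fun (st : PySem.Set (Int × Int) × Int) i =>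
        let word := (PySem.List.pyGetD seq i 0, PySem.List.pyGetD seq (i + d + 1) 0)
        if word ∈ st.1 then (st.1, st.2 + 1) else (PySem.Set.add st.1 word, st.2))
      (PySem.Set.empty, 0)
  st.2

-- ===== PORT B =====
def is_surprising_alt (seq : List Int) (d : Int) : Int :=
  let pairs :=
    PySem.List.sorted2
      ((PySem.List.pyRange 0 ((seq.length : Int) - d - 1) 1).map
        (fun i => (PySem.List.pyGetD seq i 0, PySem.List.pyGetD seq (i + d + 1) 0)))
      Prod.fst Prod.snd false
  ((pairs.zip (PySem.List.slice pairs (some 1) none)).map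
    (fun w => if w.1 = w.2 then (1 : Int) else 0)).sum

-- ===== PRECONDITION & SPEC =====
-- Pre_ : A raises IndexError whenever d ≤ -2 (the loop bound len(seq)-d-1 then exceeds
-- len(seq), so i reaches len(seq)); for d ≥ -1 every index access is in range.
def Pre_is_surprising (seq : List Int) (d : Int) : Prop := -1 ≤ d
instance (seq : List Int) (d : Int) : Decidable (Pre_is_surprising seq d) := by unfold Pre_is_surprising; infer_instance
def pvWitness_is_surprising : List Int × Int := ([1, 2, 1, 2, 1], 0)

def Spec_is_surprising (seq : List Int) (d : Int) (out : Int) : Prop := out = is_surprising_alt seq d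
instance (seq : List Int) (d : Int) (out : Int) : Decidable (Spec_is_surprising seq d out) := by unfold Spec_is_surprising; infer_instance

-- ===== CLAIM (what is proved, stated in full; the proofs are below) =====
def Claim_equal_is_surprising : Prop := ∀ (seq : List Int) (d : Int), Dom_is_surprising seq d → Pre_is_surprising seq d → Spec_is_surprising seq d (is_surprising seq d)

-- ===== LEMMAS AND PROOFS =====

-- Python's tuple comparison on Int × Int, exactly as sorted2 compares (lexicographic <).
def pvLt (a b : Int × Int) : Bool :=
  decide (a.1 < b.1) || (!decide (b.1 < a.1) && decide (a.2 < b.2))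

-- A's loop invariant: collisions gained + set-size gained = number of pairs processed.
theorem loopA_invariant (L : List (Int × Int)) (s : PySem.Set (Int × Int)) (c : Int) :
    L.foldl
      (fun (st : PySem.Set (Int × Int) × Int) w =>
        if w ∈ st.1 then (st.1, st.2 + 1) else (PySem.Set.add st.1 w, st.2))
      (s, c)
    = (L.foldl PySem.Set.add s,
       c + (L.length : Int) - ((L.foldl PySem.Set.add s).length - (s.length : Int))) := by
  induction L generalizing s c with
  | nil => simp
  | cons w L ih =>
    simp only [List.foldl_cons]
    by_cases hw : w ∈ s
    · rw [if_pos hw, ih, PySem.Set.add_of_mem hw]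
      congr 1
      push_cast [List.length_cons]
      ring
    · rw [if_neg hw, ih, PySem.Set.add_of_not_mem hw]
      congr 1
      push_cast [List.length_cons, List.length_append, List.length_nil]
      ring

theorem pvLt_asymm {a b : Int × Int} (h : pvLt a b = true) : pvLt b a = false := by
  simp only [pvLt] at *
  rcases a with ⟨a1, a2⟩; rcases b with ⟨b1, b2⟩
  simp at *; omega

theorem pvLt_total_eq {a b : Int × Int} (h1 : pvLt a b = false) (h2 : pvLt b a = false) : a = b := by
  simp only [pvLt] at *
  rcases a with ⟨a1, a2⟩; rcases b with ⟨b1, b2⟩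
  simp at *
  have : a1 = b1 ∧ a2 = b2 := by omega
  simp [this.1, this.2]

theorem pvLt_trans_neg {a b c : Int × Int} (h1 : pvLt b a = false) (h2 : pvLt c b = false) :
    pvLt c a = false := by
  simp only [pvLt] at *
  rcases a with ⟨a1, a2⟩; rcases b with ⟨b1, b2⟩; rcases c with ⟨c1, c2⟩
  simp at *; omega

theorem pairwise_insertBy (x : Int × Int) (ys : List (Int × Int))
    (h : ys.Pairwise (fun a b => pvLt b a = false)) :
    (PySem.List.insertBy pvLt x ys).Pairwise (fun a b => pvLt b a = false) := by
  induction ys with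
  | nil => simp [PySem.List.insertBy]
  | cons y ys ih =>
    rw [List.pairwise_cons] at h
    by_cases hxy : pvLt x y = true
    · rw [show PySem.List.insertBy pvLt x (y :: ys) = x :: y :: ys by
        simp [PySem.List.insertBy, hxy]]
      refine List.Pairwise.cons ?_ (List.pairwise_cons.mpr h)
      intro z hz
      rcases List.mem_cons.mp hz with rfl | hz
      · exact pvLt_asymm hxy
      · exact pvLt_trans_neg (pvLt_asymm hxy) (h.1 z hz)
    · have hxy' : pvLt x y = false := by simpa using hxy
      rw [show PySem.List.insertBy pvLt x (y :: ys) = y :: PySem.List.insertBy pvLt x ys by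
        simp [PySem.List.insertBy, hxy']]
      refine List.Pairwise.cons ?_ (ih h.2)
      intro z hz
      rcases (PySem.List.mem_insertBy pvLt x z ys).mp hz with rfl | hz
      · exact hxy'
      · exact h.1 z hz

theorem pairwise_foldl_insertBy (L : List (Int × Int)) (acc : List (Int × Int))
    (hacc : acc.Pairwise (fun a b => pvLt b a = false)) :
    (L.foldl (fun acc x => PySem.List.insertBy pvLt x acc) acc).Pairwise
      (fun a b => pvLt b a = false) := by
  induction L generalizing acc with
  | nil => simpa using hacc
  | cons x L ih => exact ih _ (pairwise_insertBy x acc hacc)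

theorem sorted2_eq_foldl (L : List (Int × Int)) :
    PySem.List.sorted2 L Prod.fst Prod.snd false
    = L.foldl (fun acc x => PySem.List.insertBy pvLt x acc) [] := by
  rfl

theorem sorted2_pairwise_lex (L : List (Int × Int)) :
    (PySem.List.sorted2 L Prod.fst Prod.snd false).Pairwise (fun a b => pvLt b a = false) := by
  rw [sorted2_eq_foldl]
  exact pairwise_foldl_insertBy L [] (by simp)

-- On a lex-sorted list, the number of adjacent equal neighbours is length − #distinct.
theorem adj_sorted (M : List (Int × Int)) (h : M.Pairwise (fun a b => pvLt b a = false)) :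
    ((M.zip M.tail).map (fun w => if w.1 = w.2 then (1 : Int) else 0)).sum
    = (M.length : Int) - (M.dedup.length : Int) := by
  induction M with
  | nil => simp
  | cons a t ih =>
    cases t with
    | nil => simp
    | cons b t' =>
      rw [List.pairwise_cons] at h
      have hrest := ih h.2
      by_cases hab : a = b
      · have hmem : a ∈ b :: t' := by simp [hab]
        rw [List.dedup_cons_of_mem hmem]
        simp only [List.tail_cons, List.zip_cons_cons, List.map_cons, List.sum_cons,
          if_pos hab]
        simp only [List.tail_cons] at hrest
        rw [hrest]
        simp only [List.length_cons]
        push_cast; ring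
      · have hnmem : a ∉ b :: t' := by
          intro hmem
          rcases List.mem_cons.mp hmem with rfl | hmem
          · exact hab rfl
          · -- a occurs in t', hence pvLt a b = false from h.2, and pvLt b a = false from h.1
            have h1 : pvLt b a = false := h.1 b (by simp)
            have h2 : pvLt a b = false := (List.pairwise_cons.mp h.2).1 a hmem
            exact hab (pvLt_total_eq h2 h1)
        rw [List.dedup_cons_of_notMem hnmem]
        simp only [List.tail_cons, List.zip_cons_cons, List.map_cons, List.sum_cons,
          if_neg hab]
        simp only [List.tail_cons] at hrest
        rw [hrest]
        simp only [List.length_cons]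
        push_cast; ring

-- #distinct of the sorted copy equals the size of A's final set.
theorem dedup_length_eq (L M : List (Int × Int)) (hperm : M.Perm L) :
    (M.dedup.length : Int) = ((PySem.Set.ofList L).length : Int) := by
  have hp : M.dedup.Perm (PySem.Set.ofList L) := by
    rw [List.perm_ext_iff_of_nodup M.nodup_dedup (PySem.Set.nodup_ofList L)]
    intro x
    rw [List.mem_dedup, PySem.Set.mem_ofList]
    exact ⟨fun hx => hperm.mem_iff.mp hx, fun hx => hperm.mem_iff.mpr hx⟩
  rw [hp.length_eq]

theorem slice_one_eq_tail (M : List (Int × Int)) :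
    PySem.List.slice M (some 1) none = M.tail := by
  cases M with
  | nil => rfl
  | cons a t => simp [PySem.List.slice_from, List.tail_cons]

theorem foldlA_eq (seq : List Int) (d : Int) :
    (PySem.List.pyRange 0 ((seq.length : Int) - d - 1) 1).foldl
      (fun (st : PySem.Set (Int × Int) × Int) i =>
        if (PySem.List.pyGetD seq i 0, PySem.List.pyGetD seq (i + d + 1) 0) ∈ st.1
        then (st.1, st.2 + 1)
        else (PySem.Set.add st.1 (PySem.List.pyGetD seq i 0, PySem.List.pyGetD seq (i + d + 1) 0), st.2))
      (PySem.Set.empty, 0)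
    = ((PySem.List.pyRange 0 ((seq.length : Int) - d - 1) 1).map
        (fun i => (PySem.List.pyGetD seq i 0, PySem.List.pyGetD seq (i + d + 1) 0))).foldl
      (fun (st : PySem.Set (Int × Int) × Int) w =>
        if w ∈ st.1 then (st.1, st.2 + 1) else (PySem.Set.add st.1 w, st.2))
      (PySem.Set.empty, 0) := by rw [List.foldl_map]

-- ===== VERDICT (by name: the statement is the Claim_ definition above) =====
theorem is_surprising_spec : Claim_equal_is_surprising := by
  intro seq d _ _
  unfold Spec_is_surprising is_surprising is_surprising_alt
  rw [foldlA_eq, loopA_invariant]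
  dsimp only
  simp only [PySem.Set.empty, ← PySem.Set.ofList_eq_foldl, List.length_nil]
  set L := (PySem.List.pyRange 0 ((seq.length : Int) - d - 1) 1).map
    (fun i => (PySem.List.pyGetD seq i 0, PySem.List.pyGetD seq (i + d + 1) 0))
  set M := PySem.List.sorted2 L Prod.fst Prod.snd false
  have hperm : M.Perm L := PySem.List.sorted2_perm L Prod.fst Prod.snd false
  rw [slice_one_eq_tail, adj_sorted M (sorted2_pairwise_lex L), dedup_length_eq L M hperm,
    hperm.length_eq]
  push_cast
  ring
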